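-- pv_equiv track=rewrite | github.com/Alser1204/arcaea.py | discordbot.py | minus_count
-- ===== SOURCE A (Python) =====
-- from collections import Counter
--
-- def minus_count(A: str, B: str) -> str:
--     cnt = Counter(B)
--     result = []
--
--     for c in A:
--         if cnt[c] > 0:
--             cnt[c] -= 1
--         else:
--             result.append(c)
--
--     return "".join(result)
-- ===== SOURCE B (Python) =====
-- def minus_count(A: str, B: str) -> str:
--     chars = list(A)
--     for c in B:
--         if c in chars:
--             chars.remove(c)
--     return "".join(chars)
-- ===== Notes on version B (the rewrite author's own statement) =====
-- stated objective: alternative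
-- what changed: Replaces the Counter-budget single pass over A with iteration over B's characters, each deleting its first remaining occurrence from a mutable list of A's characters.
import Mathlib
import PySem

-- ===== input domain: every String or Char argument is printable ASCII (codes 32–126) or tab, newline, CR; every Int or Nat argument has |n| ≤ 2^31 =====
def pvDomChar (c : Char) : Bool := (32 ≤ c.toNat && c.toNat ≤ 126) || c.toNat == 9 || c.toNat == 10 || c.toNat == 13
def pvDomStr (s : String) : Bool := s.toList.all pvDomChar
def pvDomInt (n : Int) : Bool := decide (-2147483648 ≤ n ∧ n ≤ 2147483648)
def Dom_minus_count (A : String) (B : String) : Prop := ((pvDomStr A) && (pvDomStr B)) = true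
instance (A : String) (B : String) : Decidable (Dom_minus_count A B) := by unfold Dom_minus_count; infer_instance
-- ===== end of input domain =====

-- B removes B's characters from A by repeated first-occurrence deletion instead of A's
-- Counter-budget pass; same cost class is not claimed (objective: alternative decomposition).

-- ===== PORT A =====
-- cnt = Counter(B); for c in A: if cnt[c] > 0: cnt[c] -= 1 else: result.append(c); "".join(result)
-- (result holds single characters, so "".join(result) is exactly String.ofList of the list)
def minus_count (A : String) (B : String) : String :=
  let cnt := PySem.Dict.counter B.toList
  let st := A.toList.foldl
    (fun (st : PySem.Dict Char Int × List Char) c =>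
      if st.1.getD c 0 > 0 then (st.1.insert c (st.1.getD c 0 - 1), st.2)
      else (st.1, st.2 ++ [c]))
    (cnt, [])
  String.ofList st.2

-- ===== PORT B =====
-- chars = list(A); for c in B: if c in chars: chars.remove(c); "".join(chars)
def minus_count_alt (A : String) (B : String) : String :=
  String.ofList (B.toList.foldl (fun l c => if c ∈ l then l.erase c else l) A.toList)

-- ===== PRECONDITION & SPEC =====
def Spec_minus_count (A : String) (B : String) (out : String) : Prop := out = minus_count_alt A B
instance (A : String) (B : String) (out : String) : Decidable (Spec_minus_count A B out) := by unfold Spec_minus_count; infer_instance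

-- ===== CLAIM (what is proved, stated in full; the proofs are below) =====
def Claim_equal_minus_count : Prop := ∀ (A : String) (B : String), Dom_minus_count A B → Spec_minus_count A B (minus_count A B)

-- ===== LEMMAS AND PROOFS =====

/-- Reference function: traverse `l`, dropping the first `f c` occurrences of each `c`. -/
def eraseCounts (f : Char → Nat) : List Char → List Char
  | [] => []
  | a :: l =>
      if f a > 0 then eraseCounts (fun x => if x = a then f x - 1 else f x) l
      else a :: eraseCounts f l

theorem eraseCounts_zero (f : Char → Nat) (h : ∀ c, f c = 0) :
    ∀ l, eraseCounts f l = l := by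
  intro l
  induction l with
  | nil => rfl
  | cons a l ih => simp [eraseCounts, h a, ih]

theorem eraseCounts_congr {f g : Char → Nat} (h : ∀ c, f c = g c) :
    ∀ l, eraseCounts f l = eraseCounts g l := by
  have : f = g := funext h
  simp [this]

/-- Bumping the budget of `b` by one is the same as erasing the first `b` beforehand. -/
theorem eraseCounts_succ (b : Char) :
    ∀ (l : List Char) (f : Char → Nat),
      eraseCounts (fun x => if x = b then f x + 1 else f x) l = eraseCounts f (l.erase b) := by
  intro l
  induction l with
  | nil => intro f; rfl
  | cons a l ih =>
    intro f
    by_cases hab : a = b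
    · rw [hab, List.erase_cons_head]
      have hpos : (if b = b then f b + 1 else f b) > 0 := by simp
      rw [eraseCounts, if_pos hpos]
      exact eraseCounts_congr (fun c => by by_cases hc : c = b <;> simp [hc]) l
    · have hba : ¬ (a == b) = true := by simp [hab]
      rw [List.erase_cons_tail hba]
      by_cases hfa : f a > 0
      · have hpos : (if a = b then f a + 1 else f a) > 0 := by simp [hab, hfa]
        simp only [eraseCounts, if_pos hpos, if_pos hfa]
        rw [eraseCounts_congr (g := fun x => if x = b then (fun y => if y = a then f y - 1 else f y) x + 1
              else (fun y => if y = a then f y - 1 else f y) x)]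
        · exact ih _
        · intro c
          by_cases hcb : c = b <;> by_cases hca : c = a <;> simp_all
      · have hneg : ¬ (if a = b then f a + 1 else f a) > 0 := by simp [hab]; omega
        simp only [eraseCounts, if_neg hneg, if_neg hfa]
        rw [ih f]

/-- B's fold over `bs` equals the reference pass with budgets `bs.count`. -/
theorem foldl_erase_eq_eraseCounts :
    ∀ (bs l : List Char),
      bs.foldl (fun l c => if c ∈ l then l.erase c else l) l
        = eraseCounts (fun c => bs.count c) l := by
  intro bs
  induction bs with
  | nil =>
    intro l
    simp [List.foldl]
    exact (eraseCounts_zero _ (by simp) l).symm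
  | cons b bs ih =>
    intro l
    have step : (if b ∈ l then l.erase b else l) = l.erase b := by
      by_cases hb : b ∈ l
      · simp [hb]
      · simp [hb, List.erase_of_not_mem hb]
    rw [List.foldl_cons, step, ih]
    rw [← eraseCounts_succ b l (fun c => bs.count c)]
    apply eraseCounts_congr
    intro c
    by_cases hc : c = b
    · simp [hc]
    · simp [hc, Ne.symm hc]

/-- A's fold, under the dict/budget correspondence, computes the reference pass. -/
theorem foldl_dict_eq_eraseCounts :
    ∀ (as : List Char) (d : PySem.Dict Char Int) (f : Char → Nat) (acc : List Char),
      (∀ c, d.getD c 0 = (f c : Int)) →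
      (as.foldl
        (fun (st : PySem.Dict Char Int × List Char) c =>
          if st.1.getD c 0 > 0 then (st.1.insert c (st.1.getD c 0 - 1), st.2)
          else (st.1, st.2 ++ [c]))
        (d, acc)).2 = acc ++ eraseCounts f as := by
  intro as
  induction as with
  | nil => intro d f acc h; simp [eraseCounts]
  | cons a l ih =>
    intro d f acc h
    by_cases hfa : f a > 0
    · have hd : d.getD a 0 > 0 := by rw [h a]; exact_mod_cast hfa
      rw [List.foldl_cons]
      simp only [hd, if_pos]
      rw [ih (d.insert a (d.getD a 0 - 1)) (fun x => if x = a then f x - 1 else f x) acc ?_]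
      · simp [eraseCounts, hfa]
      · intro c
        rw [PySem.Dict.getD_insert]
        by_cases hca : c = a
        · rw [hca]
          beta_reduce
          rw [if_pos rfl, if_pos rfl, h a]
          omega
        · beta_reduce
          rw [if_neg hca, if_neg hca]
          exact h c
    · have hd : ¬ d.getD a 0 > 0 := by rw [h a]; exact_mod_cast hfa
      rw [List.foldl_cons]
      simp only [if_neg hd]
      rw [ih d f (acc ++ [a]) h]
      simp [eraseCounts, hfa]

-- ===== VERDICT (by name: the statement is the Claim_ definition above) =====
theorem minus_count_spec : Claim_equal_minus_count := by
  intro A B _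
  show minus_count A B = minus_count_alt A B
  unfold minus_count minus_count_alt
  simp only [foldl_dict_eq_eraseCounts A.toList (PySem.Dict.counter B.toList)
      (fun c => B.toList.count c) [] (fun c => PySem.Dict.getD_counter ..),
    foldl_erase_eq_eraseCounts, List.nil_append]
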